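-- pv_equiv track=rewrite | github.com/markasoftware/KreO | evaluation/pdb_parser.py | get_name_namespace_removed
-- ===== SOURCE A (Python) =====
-- def get_name_namespace_removed(name: str) -> str:
--     def _remove_namespace(s: str) -> str:
--         s_no_namespace_start = s.rfind("::")
--         if s_no_namespace_start == -1:
--             return s
--         else:
--             return s[s_no_namespace_start + 2 :]
--
--     if name[-1] == ">":
--         name_reversed = reversed(name)
--         template_stack = 0
--
--         # remove template
--         i = 0
--         for i, ch in zip(range(len(name)), name_reversed):
--             if ch == ">":
--                 template_stack += 1
--             elif ch == "<":
--                 template_stack -= 1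
--
--             if template_stack == 0:
--                 break
--
--         name_no_namespace = _remove_namespace(name[: -i - 1])
--         name_no_namespace += name[-i - 1 :]
--
--     else:
--         name_no_namespace = _remove_namespace(name)
--
--     return name_no_namespace
-- ===== SOURCE B (Python) =====
-- def get_name_namespace_removed(name: str) -> str:
--     if name[-1] == ">":
--         # Forward pass: the split point is the last index whose running
--         # '<'-minus-'>' depth equals the final depth (default 0).
--         final_depth = sum((ch == "<") - (ch == ">") for ch in name)
--         depth = 0
--         p = 0
--         for j, ch in enumerate(name):
--             if depth == final_depth:
--                 p = j
--             depth += (ch == "<") - (ch == ">")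
--         base, template = name[:p], name[p:]
--     else:
--         base, template = name, ""
--     k = base.rfind("::")
--     return (base if k == -1 else base[k + 2:]) + template
-- ===== Notes on version B (the rewrite author's own statement) =====
-- stated objective: alternative
-- what changed: Replaces A's reverse scan with an early break (plus a nested _remove_namespace helper) by a forward arithmetic pass: the split point is the last index whose running '<'-minus-'>' depth equals the final depth, with rfind inlined.
import Mathlib
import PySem

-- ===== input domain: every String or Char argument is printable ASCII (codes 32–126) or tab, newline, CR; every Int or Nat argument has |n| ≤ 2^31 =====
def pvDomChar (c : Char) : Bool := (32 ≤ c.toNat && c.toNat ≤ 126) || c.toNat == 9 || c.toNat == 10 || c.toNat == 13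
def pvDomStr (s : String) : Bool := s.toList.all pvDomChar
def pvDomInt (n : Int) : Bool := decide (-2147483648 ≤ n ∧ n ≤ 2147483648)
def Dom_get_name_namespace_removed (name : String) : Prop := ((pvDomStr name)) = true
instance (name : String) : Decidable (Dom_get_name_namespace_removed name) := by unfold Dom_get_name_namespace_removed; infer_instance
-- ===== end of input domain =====

-- B replaces A's reverse scan-with-break by a forward depth pass (alternative decomposition, same cost).

-- ===== PORT A =====
-- the inner 'for i, ch in zip(range(len(name)), reversed(name))' with break at stack == 0
def pvLoopA : List (Int × Char) → Int → Int → Int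
  | [], i, _ => i
  | (j, ch) :: rest, _, stack =>
    let stack := if ch = '>' then stack + 1 else if ch = '<' then stack - 1 else stack
    if stack = 0 then j else pvLoopA rest j stack

-- A's nested helper _remove_namespace
def pvRemoveNamespaceA (s : List Char) : List Char :=
  let k := PySem.Chars.rfind s (String.toList "::")
  if k = -1 then s else PySem.List.slice s (some (k + 2)) none

def get_name_namespace_removed (name : String) : String :=
  let l := name.toList
  match PySem.List.pyGet? l (-1) with
  | none => ""   -- name[-1] raises IndexError in Python; excluded by Pre_
  | some c =>
    if c = '>' then
      let i := pvLoopA (PySem.List.enumerate l.reverse 0) 0 0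
      let base := PySem.List.slice l none (some (-i - 1))
      let tmpl := PySem.List.slice l (some (-i - 1)) none
      String.ofList (pvRemoveNamespaceA base ++ tmpl)
    else
      String.ofList (pvRemoveNamespaceA l)

-- ===== PORT B =====
-- B's forward 'for j, ch in enumerate(name)' recording the last index at final depth
def pvLoopB : List (Int × Char) → Int → Int → Int → Int
  | [], _, _, p => p
  | (j, ch) :: rest, tgt, depth, p =>
    let p' := if depth = tgt then j else p
    pvLoopB rest tgt (depth + ((if ch = '<' then 1 else 0) - (if ch = '>' then 1 else 0))) p'

def get_name_namespace_removed_alt (name : String) : String :=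
  let l := name.toList
  match PySem.List.pyGet? l (-1) with
  | none => ""   -- name[-1] raises IndexError in Python; excluded by Pre_
  | some c =>
    let bt :=
      if c = '>' then
        let finalDepth := (l.map (fun ch => (if ch = '<' then (1 : Int) else 0) - (if ch = '>' then 1 else 0))).sum
        let p := pvLoopB (PySem.List.enumerate l 0) finalDepth 0 0
        (PySem.List.slice l none (some p), PySem.List.slice l (some p) none)
      else (l, [])
    let k := PySem.Chars.rfind bt.1 (String.toList "::")
    String.ofList ((if k = -1 then bt.1 else PySem.List.slice bt.1 (some (k + 2)) none) ++ bt.2)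

-- ===== PRECONDITION & SPEC =====
-- Pre_ excludes only the empty string, on which A (name[-1]) raises IndexError.
def Pre_get_name_namespace_removed (name : String) : Prop := name ≠ ""
instance (name : String) : Decidable (Pre_get_name_namespace_removed name) := by unfold Pre_get_name_namespace_removed; infer_instance
def pvWitness_get_name_namespace_removed : String := "std::vector<int>"

def Spec_get_name_namespace_removed (name : String) (out : String) : Prop := out = get_name_namespace_removed_alt name
instance (name : String) (out : String) : Decidable (Spec_get_name_namespace_removed name out) := by unfold Spec_get_name_namespace_removed; infer_instance

-- ===== CLAIM (what is proved, stated in full; the proofs are below) =====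
def Claim_equal_get_name_namespace_removed : Prop := ∀ (name : String), Dom_get_name_namespace_removed name → Pre_get_name_namespace_removed name → Spec_get_name_namespace_removed name (get_name_namespace_removed name)

-- ===== LEMMAS AND PROOFS =====

-- per-character stack increments of A's loop ('>' ↦ +1, '<' ↦ -1) and B's depth increments (the negation)
def pvG1 (ch : Char) : Int := if ch = '>' then 1 else if ch = '<' then -1 else 0
def pvD1 (ch : Char) : Int := (if ch = '<' then 1 else 0) - (if ch = '>' then 1 else 0)
def pvDsum (l : List Char) : Int := (l.map pvD1).sum

-- index of the FIRST position where A's stack reaches 0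
def pvFirstHit : List Char → Int → Option Nat
  | [], _ => none
  | ch :: rest, st =>
    let st' := st + pvG1 ch
    if st' = 0 then some 0 else (pvFirstHit rest st').map (· + 1)

-- index of the LAST position whose running depth equals tgt
def pvLastHit : List Char → Int → Int → Option Nat
  | [], _, _ => none
  | ch :: rest, tgt, depth =>
    match pvLastHit rest tgt (depth + pvD1 ch) with
    | some m => some (m + 1)
    | none => if depth = tgt then some 0 else none

theorem pvD1_eq_neg_g1 (ch : Char) : pvD1 ch = -pvG1 ch := by
  unfold pvD1 pvG1; split_ifs <;> simp_all

theorem pvStackStep (ch : Char) (st : Int) :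
    (if ch = '>' then st + 1 else if ch = '<' then st - 1 else st) = st + pvG1 ch := by
  unfold pvG1; split_ifs <;> ring

theorem pvDepthStep (ch : Char) (d : Int) :
    d + ((if ch = '<' then (1 : Int) else 0) - (if ch = '>' then 1 else 0)) = d + pvD1 ch := rfl

theorem pvLoopA_spec (r : List Char) (k0 iprev st : Int) :
    pvLoopA (PySem.List.enumerate r k0) iprev st =
      match pvFirstHit r st with
      | some m => k0 + m
      | none => match r with | [] => iprev | _ => k0 + r.length - 1 := by
  induction r generalizing k0 iprev st with
  | nil => simp [PySem.List.enumerate_nil, pvLoopA, pvFirstHit]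
  | cons ch rest ih =>
    rw [PySem.List.enumerate_cons]
    simp only [pvLoopA, pvStackStep]
    · by_cases h : st + pvG1 ch = 0
      · simp [pvFirstHit, h]
      · rw [if_neg h, ih]
        simp only [pvFirstHit, h]
        cases hf : pvFirstHit rest (st + pvG1 ch) with
        | some m => simp; push_cast; ring
        | none =>
          cases rest with
          | nil => simp [pvFirstHit]
          | cons a b => simp; push_cast; ring

theorem pvLoopB_spec (l : List Char) (k0 tgt depth p : Int) :
    pvLoopB (PySem.List.enumerate l k0) tgt depth p =
      match pvLastHit l tgt depth with
      | some m => k0 + m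
      | none => p := by
  induction l generalizing k0 depth p with
  | nil => simp [PySem.List.enumerate_nil, pvLoopB, pvLastHit]
  | cons ch rest ih =>
    rw [PySem.List.enumerate_cons]
    simp only [pvLoopB, pvDepthStep]
    rw [ih]
    simp only [pvLastHit]
    cases hf : pvLastHit rest tgt (depth + pvD1 ch) with
    | some m => simp; ring
    | none => split_ifs <;> simp

theorem pvLastHit_append (l : List Char) (c : Char) (tgt depth : Int) :
    pvLastHit (l ++ [c]) tgt depth =
      if depth + pvDsum l = tgt then some l.length else pvLastHit l tgt depth := by
  induction l generalizing depth with
  | nil => simp [pvLastHit, pvDsum]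
  | cons a rest ih =>
    simp only [List.cons_append, pvLastHit, ih]
    have : depth + pvD1 a + pvDsum rest = depth + pvDsum (a :: rest) := by
      simp [pvDsum]; ring
    rw [this]
    by_cases h : depth + pvDsum (a :: rest) = tgt
    · simp [h]
    · simp [h]

theorem pvCore (l : List Char) : ∀ st : Int,
    (pvFirstHit l.reverse st = none ∧ pvLastHit l (pvDsum l - st) 0 = none) ∨
    (∃ m : Nat, m < l.length ∧ pvFirstHit l.reverse st = some m ∧
      pvLastHit l (pvDsum l - st) 0 = some (l.length - 1 - m)) := by
  induction l using List.reverseRecOn with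
  | nil => intro st; left; simp [pvFirstHit, pvLastHit]
  | append_singleton l c ih =>
    intro st
    have hrev : (l ++ [c]).reverse = c :: l.reverse := by simp
    rw [hrev]
    have hsum : pvDsum (l ++ [c]) = pvDsum l + pvD1 c := by simp [pvDsum]
    by_cases h : st + pvG1 c = 0
    · right
      refine ⟨0, by simp, ?_, ?_⟩
      · simp [pvFirstHit, h]
      · rw [pvLastHit_append]
        have : (0 : Int) + pvDsum l = pvDsum (l ++ [c]) - st := by
          rw [hsum, pvD1_eq_neg_g1]; omega
        simp [this]
    · have hcond : ¬ ((0 : Int) + pvDsum l = pvDsum (l ++ [c]) - st) := by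
        rw [hsum, pvD1_eq_neg_g1]; omega
      have htgt : pvDsum (l ++ [c]) - st = pvDsum l - (st + pvG1 c) := by
        rw [hsum, pvD1_eq_neg_g1]; ring
      rcases ih (st + pvG1 c) with ⟨h1, h2⟩ | ⟨m, hm, h1, h2⟩
      · left
        constructor
        · simp [pvFirstHit, h, h1]
        · rw [pvLastHit_append, if_neg hcond, htgt, h2]
      · right
        refine ⟨m + 1, by simpa using Nat.succ_lt_succ hm, ?_, ?_⟩
        · simp [pvFirstHit, h, h1]
        · rw [pvLastHit_append, if_neg hcond, htgt, h2]
          congr 1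
          simp
          omega

-- the two split points give the same take/drop decomposition
theorem pvSplit_eq (l : List Char) (hl : l ≠ []) :
    (PySem.List.slice l none (some (-(pvLoopA (PySem.List.enumerate l.reverse 0) 0 0) - 1)),
     PySem.List.slice l (some (-(pvLoopA (PySem.List.enumerate l.reverse 0) 0 0) - 1)) none)
    = (PySem.List.slice l none (some (pvLoopB (PySem.List.enumerate l 0) (pvDsum l) 0 0)),
       PySem.List.slice l (some (pvLoopB (PySem.List.enumerate l 0) (pvDsum l) 0 0)) none) := by
  have hA := pvLoopA_spec l.reverse 0 0 0
  have hB := pvLoopB_spec l 0 (pvDsum l) 0 0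
  have h0 : pvDsum l - 0 = pvDsum l := by ring
  rcases pvCore l 0 with ⟨h1, h2⟩ | ⟨m, hm, h1, h2⟩
  · rw [h1] at hA
    rw [h0] at h2
    rw [h2] at hB
    cases l with
    | nil => exact absurd rfl hl
    | cons a b =>
      have hAr : pvLoopA (PySem.List.enumerate (a :: b).reverse 0) 0 0 = ((a :: b).length : Int) - 1 := by
        rw [hA]
        cases hrv : (a :: b).reverse with
        | nil => exact absurd hrv (by simp)
        | cons x y =>
          have hlen : (x :: y).length = (a :: b).length := by rw [← hrv]; simp
          simp [hlen]
      rw [hAr, hB]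
      have hneg : -((((a :: b).length : Int)) - 1) - 1 = -(((a :: b).length : Nat) : Int) := by
        ring
      rw [hneg]
      have hlen0 : 0 < (a :: b).length := by simp
      rw [PySem.List.slice_to_neg_natCast _ _ hlen0, PySem.List.slice_from_neg_natCast _ _ hlen0]
      simp [PySem.List.slice_to, PySem.List.slice_from]
  · rw [h1] at hA
    rw [h0] at h2
    rw [h2] at hB
    rw [hA, hB]
    simp only [zero_add]
    have hneg : -((m : Nat) : Int) - 1 = -(((m + 1 : Nat) : Int)) := by push_cast; ring
    rw [hneg]
    have hm1 : 0 < m + 1 := Nat.succ_pos m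
    rw [PySem.List.slice_to_neg_natCast _ _ hm1, PySem.List.slice_from_neg_natCast _ _ hm1]
    rw [PySem.List.slice_to_natCast, PySem.List.slice_from_natCast]
    have hmn : l.length - 1 - m = l.length - (m + 1) := by omega
    rw [hmn]

-- ===== VERDICT (by name: the statement is the Claim_ definition above) =====
theorem get_name_namespace_removed_spec : Claim_equal_get_name_namespace_removed := by
  intro name _ hpre
  unfold Spec_get_name_namespace_removed get_name_namespace_removed get_name_namespace_removed_alt
  have hl : name.toList ≠ [] := by
    intro h
    exact hpre (by cases name; simp_all)
  cases hget : PySem.List.pyGet? name.toList (-1) with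
  | none => simp only [hget]
  | some c =>
    simp only [hget]
    by_cases hc : c = '>'
    · simp only [if_pos hc]
      have hsp := pvSplit_eq name.toList hl
      simp only [Prod.mk.injEq] at hsp
      obtain ⟨e1, e2⟩ := hsp
      have hfun : (fun ch => (if ch = '<' then (1 : Int) else 0) - (if ch = '>' then 1 else 0)) = pvD1 := rfl
      simp only [hfun, pvDsum] at e1 e2 ⊢
      rw [e1, e2]
      simp [pvRemoveNamespaceA]
    · simp only [if_neg hc]
      simp [pvRemoveNamespaceA]
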